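-- pv_equiv track=rewrite | github.com/lequan0/course_assns | COMP 182/hw 5 infection transmission/analysis.py | compute_rdst_candidate
-- ===== SOURCE A (Python) =====
-- def compute_rdst_candidate(rgraph: dict, root: int) -> dict:
--     '''
--     computes an RDST candidate based on Lemma 1
--     this function implements Step 2 of Algorithm ComputeRDMST.
--
--     arguements:
--     rgraph -- dict, weighted digraph graph (in the reversed representation) rooted at root.
--
--     returns
--     the RDST candidate computed as a weighted digraph in the reversed representation.
--
--     [test cases now are included outside of docstring lols]
--     '''
--     # initialize rdst candidate
--     rdst_can = {}
--     for v in rgraph: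
--         rdst_can[v] = {}
--     # create rdst candidate
--     for v in rgraph:
--         if v != root:
--             me_v = min(rgraph[v].values())
--             u = [edge for edge in rgraph[v] if rgraph[v][edge] == me_v][0]
--             rdst_can[v][u] = rgraph[v][u]
--     return rdst_can
-- ===== SOURCE B (Python) =====
-- def compute_rdst_candidate(rgraph: dict, root: int) -> dict:
--     # Sort-based selection: stable-sort each non-root vertex's incoming edges by
--     # weight and keep the first pair -- stability makes that exactly the first
--     # minimum-weight edge; the whole result is one dict comprehension.
--     return {
--         v: {} if v == root else dict(sorted(edges.items(), key=lambda kv: kv[1])[:1])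
--         for v, edges in rgraph.items()
--     }
-- ===== Notes on version B (the rewrite author's own statement) =====
-- stated objective: simpler
-- what changed: Replaces the init loop plus min()-over-values plus a filtering-comprehension rescan plus two dict lookups with a single dict comprehension that stable-sorts each non-root vertex's incoming edges by weight and keeps the first pair (stability yields the same first-minimum key).
import Mathlib
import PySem

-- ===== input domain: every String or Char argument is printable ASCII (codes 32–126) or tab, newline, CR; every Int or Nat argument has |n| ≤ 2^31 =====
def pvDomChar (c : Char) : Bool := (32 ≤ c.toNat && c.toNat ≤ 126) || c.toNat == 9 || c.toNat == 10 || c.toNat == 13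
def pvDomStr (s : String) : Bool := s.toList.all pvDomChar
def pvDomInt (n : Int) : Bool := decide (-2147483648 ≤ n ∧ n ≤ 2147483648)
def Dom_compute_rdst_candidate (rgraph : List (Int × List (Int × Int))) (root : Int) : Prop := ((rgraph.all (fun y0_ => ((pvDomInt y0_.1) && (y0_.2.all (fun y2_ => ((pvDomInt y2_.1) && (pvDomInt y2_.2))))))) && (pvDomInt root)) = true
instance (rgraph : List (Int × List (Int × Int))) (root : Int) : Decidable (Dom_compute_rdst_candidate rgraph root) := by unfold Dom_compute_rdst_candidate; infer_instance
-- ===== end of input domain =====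

-- B replaces A's init loop + min()-over-values + filter-comprehension rescan + two lookups
-- by one dict comprehension that stable-sorts each edge dict by weight and keeps the first pair (simpler).

-- ===== PORT A =====
def compute_rdst_candidate (rgraph : List (Int × List (Int × Int))) (root : Int) : List (Int × List (Int × Int)) :=
  -- rdst_can = {}; for v in rgraph: rdst_can[v] = {}
  let init : PySem.Dict Int (List (Int × Int)) :=
    rgraph.foldl (fun d p => d.insert p.1 []) PySem.Dict.empty
  -- for v in rgraph: if v != root: ...
  (rgraph.foldl (fun d p =>
    if p.1 ≠ root then
      match PySem.List.min? (p.2.map Prod.snd) (fun y => y) with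
      | none => d                      -- Python: min() raises ValueError here (excluded by Pre_)
      | some me_v =>
        -- u = [edge for edge in rgraph[v] if rgraph[v][edge] == me_v][0]
        match ((p.2.filter (fun e => e.2 == me_v)).map Prod.fst).head? with
        | none => d                    -- Python: [0] raises IndexError here (unreachable)
        | some u =>
          -- rdst_can[v][u] = rgraph[v][u]
          let w := (PySem.Dict.mk p.2).getD u 0
          d.insert p.1 ((PySem.Dict.mk (d.getD p.1 [])).insert u w).items
    else d) init).items

-- ===== PORT B =====
def compute_rdst_candidate_alt (rgraph : List (Int × List (Int × Int))) (root : Int) : List (Int × List (Int × Int)) :=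
  -- {v: {} if v == root else dict(sorted(edges.items(), key=lambda kv: kv[1])[:1]) for v, edges in rgraph.items()}
  (rgraph.foldl (fun d p =>
    d.insert p.1 (
      if p.1 == root then []
      else (PySem.Dict.mk (PySem.List.slice
              (PySem.List.sorted p.2 (fun kv => kv.2)) none (some 1))).items))
    PySem.Dict.empty).items

-- ===== PRECONDITION & SPEC =====
-- Pre_ requires key-nodup (outer and inner), which is inherent to Python dict arguments
-- (duplicate keys collapse in a real dict, so duplicate-key association lists are degenerate
-- representations on which the list-level ports are not the dict-level Pythons), and excludes
-- the inputs where A raises: a non-root vertex with an empty incoming-edge dict (min() ValueError).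
def Pre_compute_rdst_candidate (rgraph : List (Int × List (Int × Int))) (root : Int) : Prop :=
  (rgraph.map Prod.fst).Nodup ∧
  (∀ p ∈ rgraph, (p.2.map Prod.fst).Nodup) ∧
  (∀ p ∈ rgraph, p.1 ≠ root → p.2 ≠ [])
instance (rgraph : List (Int × List (Int × Int))) (root : Int) : Decidable (Pre_compute_rdst_candidate rgraph root) := by unfold Pre_compute_rdst_candidate; infer_instance

def pvWitness_compute_rdst_candidate : (List (Int × List (Int × Int))) × Int :=
  ([(0, []), (1, [(0, 2), (2, 1)]), (2, [(0, 3)])], 0)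

def Spec_compute_rdst_candidate (rgraph : List (Int × List (Int × Int))) (root : Int) (out : List (Int × List (Int × Int))) : Prop := out = compute_rdst_candidate_alt rgraph root
instance (rgraph : List (Int × List (Int × Int))) (root : Int) (out : List (Int × List (Int × Int))) : Decidable (Spec_compute_rdst_candidate rgraph root out) := by unfold Spec_compute_rdst_candidate; infer_instance

-- ===== CLAIM (what is proved, stated in full; the proofs are below) =====
def Claim_equal_compute_rdst_candidate : Prop := ∀ (rgraph : List (Int × List (Int × Int))) (root : Int), Dom_compute_rdst_candidate rgraph root → Pre_compute_rdst_candidate rgraph root → Spec_compute_rdst_candidate rgraph root (compute_rdst_candidate rgraph root)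


-- ===== LEMMAS AND PROOFS =====

-- the running argmin over edges (strict '<', so the first minimum is kept)
def pvArgmin (e : Int × Int) (l : List (Int × Int)) : Int × Int :=
  l.foldl (fun b x => if x.2 < b.2 then x else b) e

lemma pvArgmin_nil (e : Int × Int) : pvArgmin e [] = e := rfl

lemma pvArgmin_cons (e x : Int × Int) (l : List (Int × Int)) :
    pvArgmin e (x :: l) = pvArgmin (if x.2 < e.2 then x else e) l := rfl

lemma pvArgmin_snd_le (l : List (Int × Int)) (e : Int × Int) : (pvArgmin e l).2 ≤ e.2 := by
  induction l generalizing e with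
  | nil => simp [pvArgmin_nil]
  | cons x t ih =>
    rw [pvArgmin_cons]
    split_ifs with h
    · exact le_trans (ih x) (le_of_lt h)
    · exact ih e

lemma pvArgmin_mem (l : List (Int × Int)) (e : Int × Int) : pvArgmin e l ∈ e :: l := by
  induction l generalizing e with
  | nil => simp [pvArgmin_nil]
  | cons x t ih =>
    rw [pvArgmin_cons]
    split_ifs with h
    · have := ih x; simp only [List.mem_cons] at this ⊢; tauto
    · have := ih e; simp only [List.mem_cons] at this ⊢; tauto

lemma pvArgmin_snd_eq_foldl_min (l : List (Int × Int)) (e : Int × Int) :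
    (pvArgmin e l).2 = (l.map Prod.snd).foldl min e.2 := by
  induction l generalizing e with
  | nil => simp [pvArgmin_nil]
  | cons x t ih =>
    rw [pvArgmin_cons, List.map_cons, List.foldl_cons, ih]
    split_ifs with h
    · have : min e.2 x.2 = x.2 := min_eq_right (le_of_lt h)
      rw [this]
    · have : min e.2 x.2 = e.2 := min_eq_left (le_of_not_gt h)
      rw [this]

lemma pvArgmin_eq_of_snd_eq (l : List (Int × Int)) (e : Int × Int)
    (h : (pvArgmin e l).2 = e.2) : pvArgmin e l = e := by
  induction l generalizing e with
  | nil => simp [pvArgmin_nil]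
  | cons x t ih =>
    rw [pvArgmin_cons] at h ⊢
    split_ifs at h ⊢ with hx
    · exfalso
      have := pvArgmin_snd_le t x
      omega
    · exact ih e h

-- the first element whose weight equals the running minimum IS the running argmin
lemma filter_head_eq_pvArgmin (l : List (Int × Int)) (e : Int × Int) :
    ((e :: l).filter (fun x => x.2 == (pvArgmin e l).2)).head? = some (pvArgmin e l) := by
  induction l generalizing e with
  | nil =>
    simp [pvArgmin_nil, List.filter]
  | cons x t ih =>
    rw [pvArgmin_cons]
    by_cases hx : x.2 < e.2
    · simp only [if_pos hx]
      have hlt : (pvArgmin x t).2 < e.2 := lt_of_le_of_lt (pvArgmin_snd_le t x) hx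
      have he : (e.2 == (pvArgmin x t).2) = false := by
        rw [beq_eq_false_iff_ne]; omega
      rw [List.filter_cons, he, if_neg Bool.false_ne_true]
      exact ih x
    · simp only [if_neg hx]
      have hle : e.2 ≤ x.2 := le_of_not_gt hx
      by_cases hm : e.2 = (pvArgmin e t).2
      · have : pvArgmin e t = e := pvArgmin_eq_of_snd_eq t e hm.symm
        rw [this] at *
        rw [List.filter_cons, if_pos (by simp)]
        simp
      · have hmin := pvArgmin_snd_le t e
        have hxne : (x.2 == (pvArgmin e t).2) = false := by
          rw [beq_eq_false_iff_ne]; omega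
        have hene : (e.2 == (pvArgmin e t).2) = false := by
          rw [beq_eq_false_iff_ne]; omega
        rw [List.filter_cons, hene, if_neg Bool.false_ne_true,
            List.filter_cons, hxne, if_neg Bool.false_ne_true]
        have := ih e
        rw [List.filter_cons, hene, if_neg Bool.false_ne_true] at this
        exact this

-- head of a stable insertion step
lemma head_insertBy (x h : Int × Int) (t : List (Int × Int)) :
    (PySem.List.insertBy (fun a b => decide (a.2 < b.2)) x (h :: t)).head? =
      some (if x.2 < h.2 then x else h) := by
  by_cases hx : x.2 < h.2 <;> simp [PySem.List.insertBy, hx]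

-- the head of B's insertion sort evolves exactly as the running argmin
lemma foldl_insertBy_head (l : List (Int × Int)) (acc : List (Int × Int)) (h : Int × Int)
    (hh : acc.head? = some h) :
    (l.foldl (fun acc x => PySem.List.insertBy (fun a b => decide (a.2 < b.2)) x acc) acc).head?
      = some (pvArgmin h l) := by
  induction l generalizing acc h with
  | nil => simpa [pvArgmin_nil] using hh
  | cons x t ih =>
    rw [List.foldl_cons, pvArgmin_cons]
    cases acc with
    | nil => simp at hh
    | cons a r =>
      simp only [List.head?_cons, Option.some.injEq] at hh
      subst hh
      exact ih _ _ (head_insertBy x a r)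

lemma sorted_head (e : Int × Int) (rest : List (Int × Int)) :
    (PySem.List.sorted (e :: rest) (fun kv => kv.2)).head? = some (pvArgmin e rest) := by
  rw [PySem.List.sorted_eq_foldl_insertBy, List.foldl_cons]
  exact foldl_insertBy_head rest _ e (by simp [PySem.List.insertBy])

-- B's inner value for a non-root vertex is the singleton of the running argmin
lemma inner_eq_alt (e : Int × Int) (rest : List (Int × Int)) :
    (PySem.Dict.mk (PySem.List.slice
        (PySem.List.sorted (e :: rest) (fun kv => kv.2)) none (some 1))).items
      = [pvArgmin e rest] := by
  have hhead := sorted_head e rest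
  rw [PySem.List.slice_to _ (by norm_num)]
  cases hs : PySem.List.sorted (e :: rest) (fun kv => kv.2) with
  | nil => rw [hs] at hhead; simp at hhead
  | cons b t =>
    rw [hs] at hhead
    simp only [List.head?_cons, Option.some.injEq] at hhead
    subst hhead
    simp

-- the inner dict A builds for a non-root vertex, starting from its {} slot
def pvInnerA (edges : List (Int × Int)) : List (Int × Int) :=
  match PySem.List.min? (edges.map Prod.snd) (fun y => y) with
  | none => []
  | some me_v =>
    match ((edges.filter (fun e => e.2 == me_v)).map Prod.fst).head? with
    | none => []
    | some u => [(u, (PySem.Dict.mk edges).getD u 0)]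

def pvTargetA (root : Int) (p : Int × List (Int × Int)) : List (Int × Int) :=
  if p.1 = root then [] else pvInnerA p.2

lemma pvKeymap (l : List (Int × List (Int × Int))) :
    (l.map (fun p => (p.1, ([] : List (Int × Int))))).map Prod.fst = l.map Prod.fst := by
  rw [List.map_map]; exact List.map_congr_left (fun a _ => rfl)

-- A's second loop overwrites each pre-initialized {} slot in place
lemma A_loop (root : Int) (l : List (Int × List (Int × Int)))
    (d : PySem.Dict Int (List (Int × Int))) (pre : List (Int × List (Int × Int)))
    (hd : d.items = pre ++ l.map (fun p => (p.1, ([] : List (Int × Int)))))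
    (hnd : ((pre ++ l.map (fun p => (p.1, ([] : List (Int × Int))))).map Prod.fst).Nodup) :
    (l.foldl (fun d p =>
      if p.1 ≠ root then
        match PySem.List.min? (p.2.map Prod.snd) (fun y => y) with
        | none => d
        | some me_v =>
          match ((p.2.filter (fun e => e.2 == me_v)).map Prod.fst).head? with
          | none => d
          | some u =>
            let w := (PySem.Dict.mk p.2).getD u 0
            d.insert p.1 ((PySem.Dict.mk (d.getD p.1 [])).insert u w).items
      else d) d).items = pre ++ l.map (fun p => (p.1, pvTargetA root p)) := by
  induction l generalizing d pre with
  | nil => simpa using hd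
  | cons p t ih =>
    have hmemfst : (p.1, ([] : List (Int × Int))) ∈ d.items := by
      rw [hd]; simp
    have hkeysnd : d.keys.Nodup := by
      have : d.keys = d.items.map Prod.fst := rfl
      rw [this, hd]; simpa using hnd
    have hgetD : d.getD p.1 [] = [] := PySem.Dict.getD_of_mem_items d hmemfst hkeysnd []
    have hnd2 : (pre.map Prod.fst ++ p.1 :: t.map Prod.fst).Nodup := by
      have h := hnd
      rw [List.map_append, pvKeymap, List.map_cons] at h
      exact h
    have hpre_ne : ∀ q ∈ pre, q.1 ≠ p.1 := by
      intro q hq hq1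
      have hdisj := (List.nodup_append.mp hnd2).2.2
      exact hdisj q.1 (List.mem_map_of_mem hq) p.1 (by simp) hq1
    have ht_ne : ∀ q ∈ t, q.1 ≠ p.1 := by
      intro q hq hq1
      have h3 := (List.nodup_append.mp hnd2).2.1
      rw [List.nodup_cons] at h3
      apply h3.1
      rw [← hq1]
      exact List.mem_map_of_mem hq
    have hstep : (if p.1 ≠ root then
        match PySem.List.min? (p.2.map Prod.snd) (fun y => y) with
        | none => d
        | some me_v =>
          match ((p.2.filter (fun e => e.2 == me_v)).map Prod.fst).head? with
          | none => d
          | some u =>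
            let w := (PySem.Dict.mk p.2).getD u 0
            d.insert p.1 ((PySem.Dict.mk (d.getD p.1 [])).insert u w).items
      else d).items = (pre ++ [(p.1, pvTargetA root p)]) ++ t.map (fun p => (p.1, ([] : List (Int × Int)))) := by
      by_cases hr : p.1 = root
      · rw [if_neg (by simp [hr]), hd]
        simp [pvTargetA, hr]
      · rw [if_pos hr]
        simp only [pvTargetA, if_neg hr, pvInnerA]
        cases hmin : PySem.List.min? (p.2.map Prod.snd) (fun y => y) with
        | none => dsimp only; rw [hd]; simp
        | some me_v =>
          dsimp only
          cases hhead : ((p.2.filter (fun e => e.2 == me_v)).map Prod.fst).head? with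
          | none => dsimp only; rw [hd]; simp
          | some u =>
            dsimp only
            simp only [hgetD]
            have hcont : d.contains p.1 = true := by
              rw [PySem.Dict.contains_eq_decide_mem_keys]
              simp only [decide_eq_true_eq]
              have hk := PySem.Dict.mem_keys_of_mem_items d hmemfst
              exact hk
            rw [PySem.Dict.items_insert_of_contains _ _ hcont, hd]
            have hinner : ((PySem.Dict.mk ([] : List (Int × Int))).insert u ((PySem.Dict.mk p.2).getD u 0)).items
                = [(u, (PySem.Dict.mk p.2).getD u 0)] := by
              rw [PySem.Dict.items_insert_of_not_contains]
              · rfl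
              · simp [PySem.Dict.contains_mk]
            rw [hinner]
            have hFpre : pre.map (fun q => if q.1 == p.1 then (p.1, [(u, (PySem.Dict.mk p.2).getD u 0)]) else q) = pre := by
              conv_rhs => rw [← List.map_id pre]
              refine List.map_congr_left (fun q hq => ?_)
              have hne := hpre_ne q hq
              simp [hne]
            have hFt : (t.map (fun p => (p.1, ([] : List (Int × Int))))).map (fun q => if q.1 == p.1 then (p.1, [(u, (PySem.Dict.mk p.2).getD u 0)]) else q) = t.map (fun p => (p.1, ([] : List (Int × Int)))) := by
              conv_rhs => rw [← List.map_id (t.map (fun p => (p.1, ([] : List (Int × Int)))))]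
              refine List.map_congr_left (fun q hq => ?_)
              obtain ⟨a, ha, rfl⟩ := List.mem_map.mp hq
              have hne := ht_ne a ha
              simp [hne]
            rw [List.map_append, List.map_cons, List.map_cons, hFpre, hFt]
            simp
    have hnd' : (((pre ++ [(p.1, pvTargetA root p)]) ++ t.map (fun p => (p.1, ([] : List (Int × Int))))).map Prod.fst).Nodup := by
      rw [List.map_append, List.map_append, pvKeymap]
      simpa using hnd2
    rw [List.foldl_cons, ih _ (pre ++ [(p.1, pvTargetA root p)]) hstep hnd']
    simp

-- pointwise: A's computed inner dict equals the running argmin singleton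
lemma inner_eq (edges : List (Int × Int)) (hinner : (edges.map Prod.fst).Nodup)
    (e : Int × Int) (rest : List (Int × Int)) (hp : edges = e :: rest) :
    pvInnerA edges = [pvArgmin e rest] := by
  subst hp
  set b := pvArgmin e rest with hb
  have hmin : PySem.List.min? ((e :: rest).map Prod.snd) (fun y => y) = some b.2 := by
    rw [List.map_cons, PySem.List.min?_id_cons, ← pvArgmin_snd_eq_foldl_min]
  have hhead := filter_head_eq_pvArgmin rest e
  have hbelem : b ∈ e :: rest := pvArgmin_mem rest e
  have hw : (PySem.Dict.mk (e :: rest)).getD b.1 0 = b.2 :=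
    PySem.Dict.getD_of_mem_items _ hbelem (by simpa using hinner) 0
  unfold pvInnerA
  rw [hmin]
  have hh : (((e :: rest).filter (fun x => x.2 == b.2)).map Prod.fst).head? = some b.1 := by
    rw [List.head?_map, hhead]; rfl
  dsimp only
  rw [hh]
  dsimp only
  rw [hw, Prod.mk.eta]

-- ===== VERDICT (by name: the statements are the Claim_ definitions above) =====
theorem compute_rdst_candidate_spec : Claim_equal_compute_rdst_candidate := by
  intro rgraph root _ hpre
  obtain ⟨hnod, hinner, hne⟩ := hpre
  show compute_rdst_candidate rgraph root = compute_rdst_candidate_alt rgraph root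
  have hinit : (rgraph.foldl (fun d p => d.insert p.1 ([] : List (Int × Int))) PySem.Dict.empty).items
      = rgraph.map (fun p => (p.1, ([] : List (Int × Int)))) := by
    have := PySem.Dict.items_foldl_insert_fresh (l := rgraph) (k := Prod.fst)
      (v := fun _ => ([] : List (Int × Int))) (d := PySem.Dict.empty)
      (by intro a _; simp [PySem.Dict.contains_empty]) hnod
    simpa using this
  have hA : compute_rdst_candidate rgraph root
      = rgraph.map (fun p => (p.1, pvTargetA root p)) := by
    unfold compute_rdst_candidate
    have := A_loop root rgraph
      (rgraph.foldl (fun d p => d.insert p.1 ([] : List (Int × Int))) PySem.Dict.empty) []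
      (by simpa using hinit)
      (by simpa using (by simpa [List.map_map] using hnod : ((rgraph.map (fun p => (p.1, ([] : List (Int × Int))))).map Prod.fst).Nodup))
    simpa using this
  have hB : compute_rdst_candidate_alt rgraph root
      = rgraph.map (fun p => (p.1,
          if p.1 == root then ([] : List (Int × Int))
          else (PySem.Dict.mk (PySem.List.slice
                  (PySem.List.sorted p.2 (fun kv => kv.2)) none (some 1))).items)) := by
    unfold compute_rdst_candidate_alt
    have := PySem.Dict.items_foldl_insert_fresh (l := rgraph) (k := Prod.fst)
      (v := fun p => if p.1 == root then ([] : List (Int × Int))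
          else (PySem.Dict.mk (PySem.List.slice
                  (PySem.List.sorted p.2 (fun kv => kv.2)) none (some 1))).items)
      (d := PySem.Dict.empty)
      (by intro a _; simp [PySem.Dict.contains_empty]) hnod
    simpa using this
  rw [hA, hB]
  apply List.map_congr_left
  intro p hp
  by_cases hr : p.1 = root
  · simp [pvTargetA, hr]
  · have hb : (p.1 == root) = false := by simp [hr]
    cases hcase : p.2 with
    | nil => exact absurd hcase (hne p hp hr)
    | cons e rest =>
      have hie := inner_eq p.2 (hinner p hp) e rest hcase
      have hia : PySem.List.slice (PySem.List.sorted (e :: rest) fun kv => kv.2) none (some 1)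
          = [pvArgmin e rest] := inner_eq_alt e rest
      rw [hcase] at hie
      simp only [pvTargetA, if_neg hr, hb, Bool.false_eq_true, if_false, hcase, hie, hia]
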